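-- pv_equiv track=rewrite | github.com/Nabiha09355/Word-Akinator-DSA-project | THEFINALE.py | highest_frequency
-- ===== SOURCE A (Python) =====
-- def highest_frequency(lst:list,dic:dict):
--     res=[]  #empty list
--     high=0  #set as our initial lowest value of a word
--     for i in lst:
--         if dic[i]>=high:
--             if dic[i]==high:
--                 res.append(i)  #appending that index in the empty list when its encountered again/ guessed again/ increased freq
--             else:
--                 res=[i]
--             high=dic[i]
--     return res  #returning that list where we are storing those values
-- ===== SOURCE B (Python) =====
-- def highest_frequency(lst, dic):
--     # Two separate passes: compute the running max (floored at 0), then filter.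
--     high = 0
--     for i in lst:
--         if dic[i] > high:
--             high = dic[i]
--     return [i for i in lst if dic[i] == high]
-- ===== Notes on version B (the rewrite author's own statement) =====
-- stated objective: simpler
-- what changed: Replaces the intertwined running-max-with-list-reset loop by two independent passes: a max scan (seeded at 0) followed by an order-preserving filter for elements whose frequency equals that max.
import Mathlib
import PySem

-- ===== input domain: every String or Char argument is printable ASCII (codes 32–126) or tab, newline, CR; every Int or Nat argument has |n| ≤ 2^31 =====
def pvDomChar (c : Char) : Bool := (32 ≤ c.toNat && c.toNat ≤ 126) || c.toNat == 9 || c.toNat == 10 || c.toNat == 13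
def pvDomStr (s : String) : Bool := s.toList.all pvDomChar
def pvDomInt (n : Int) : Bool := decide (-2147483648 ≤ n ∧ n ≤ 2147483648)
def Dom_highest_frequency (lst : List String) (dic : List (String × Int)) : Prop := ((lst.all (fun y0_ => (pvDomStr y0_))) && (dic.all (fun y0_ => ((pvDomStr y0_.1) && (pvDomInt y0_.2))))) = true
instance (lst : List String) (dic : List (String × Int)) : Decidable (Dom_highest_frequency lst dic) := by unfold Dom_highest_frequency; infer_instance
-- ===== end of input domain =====

-- B replaces A's intertwined running-max-with-reset loop by a separate max pass
-- (seeded at 0) followed by an order-preserving filter; objective: simpler.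

-- ===== PORT A =====
-- A's for-loop over lst with state (res, high); dic[i] raises KeyError on a
-- missing key, modelled by `none` (excluded by Pre_).
def hfA_loop (dic : PySem.Dict String Int) : List String → List String → Int → Option (List String × Int)
  | [], res, high => some (res, high)
  | i :: rest, res, high =>
    match PySem.Dict.get? dic i with
    | none => none
    | some v =>
      if v ≥ high then
        if v = high then hfA_loop dic rest (res ++ [i]) v
        else hfA_loop dic rest [i] v
      else hfA_loop dic rest res high

def highest_frequency (lst : List String) (dic : List (String × Int)) : List String :=
  match hfA_loop (PySem.Dict.ofList dic) lst [] 0 with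
  | some (res, _) => res
  | none => []  -- KeyError path, outside Pre_

-- ===== PORT B =====
-- pass 1 of Source B: the running max, seeded at 0 (none = KeyError)
def hfB_high (dic : PySem.Dict String Int) : List String → Int → Option Int
  | [], high => some high
  | i :: rest, high =>
    match PySem.Dict.get? dic i with
    | none => none
    | some v => hfB_high dic rest (if v > high then v else high)

-- pass 2 of Source B: the filtering comprehension (none = KeyError)
def hfB_filter (dic : PySem.Dict String Int) (h : Int) : List String → Option (List String)
  | [] => some []
  | i :: rest =>
    match PySem.Dict.get? dic i with
    | none => none
    | some v => (hfB_filter dic h rest).map (fun r => if v = h then i :: r else r)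

def highest_frequency_alt (lst : List String) (dic : List (String × Int)) : List String :=
  match hfB_high (PySem.Dict.ofList dic) lst 0 with
  | none => []  -- KeyError path, outside Pre_
  | some h => (hfB_filter (PySem.Dict.ofList dic) h lst).getD []

-- ===== PRECONDITION & SPEC =====
-- Pre_: every element of lst is a key of dic (otherwise A raises KeyError).
def Pre_highest_frequency (lst : List String) (dic : List (String × Int)) : Prop :=
  ∀ i ∈ lst, (PySem.Dict.get? (PySem.Dict.ofList dic) i).isSome
instance (lst : List String) (dic : List (String × Int)) : Decidable (Pre_highest_frequency lst dic) := by unfold Pre_highest_frequency; infer_instance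

def pvWitness_highest_frequency : List String × (List (String × Int)) :=
  (["a", "b", "a", "c"], [("a", 2), ("b", 2), ("c", 1)])

def Spec_highest_frequency (lst : List String) (dic : List (String × Int)) (out : List String) : Prop := out = highest_frequency_alt lst dic
instance (lst : List String) (dic : List (String × Int)) (out : List String) : Decidable (Spec_highest_frequency lst dic out) := by unfold Spec_highest_frequency; infer_instance

-- ===== CLAIM (what is proved, stated in full; the proofs are below) =====
def Claim_equal_highest_frequency : Prop := ∀ (lst : List String) (dic : List (String × Int)), Dom_highest_frequency lst dic → Pre_highest_frequency lst dic → Spec_highest_frequency lst dic (highest_frequency lst dic)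

-- ===== LEMMAS AND PROOFS =====

-- pure value of pass 1 under Pre_
def hiPure (dic : PySem.Dict String Int) : List String → Int → Int
  | [], high => high
  | i :: rest, high =>
    let v := (PySem.Dict.get? dic i).getD 0
    hiPure dic rest (if v > high then v else high)

-- pure value of pass 2 under Pre_
def filtPure (dic : PySem.Dict String Int) (h : Int) : List String → List String
  | [] => []
  | i :: rest =>
    if (PySem.Dict.get? dic i).getD 0 = h then i :: filtPure dic h rest
    else filtPure dic h rest

theorem hiPure_ge (dic : PySem.Dict String Int) :
    ∀ (lst : List String) (h : Int), h ≤ hiPure dic lst h := by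
  intro lst
  induction lst with
  | nil => intro h; simp [hiPure]
  | cons i rest ih =>
    intro h
    simp only [hiPure]
    refine le_trans ?_ (ih _)
    split <;> omega

theorem hfB_high_eq (dic : PySem.Dict String Int) :
    ∀ (lst : List String) (h : Int),
      (∀ i ∈ lst, (PySem.Dict.get? dic i).isSome) →
      hfB_high dic lst h = some (hiPure dic lst h) := by
  intro lst
  induction lst with
  | nil => intro h _; rfl
  | cons i rest ih =>
    intro h hp
    have hi : (PySem.Dict.get? dic i).isSome := hp i (by simp)
    obtain ⟨v, hv⟩ := Option.isSome_iff_exists.mp hi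
    simp only [hfB_high, hiPure, hv]
    rw [ih _ (fun j hj => hp j (by simp [hj]))]
    simp

theorem hfB_filter_eq (dic : PySem.Dict String Int) (h : Int) :
    ∀ (lst : List String),
      (∀ i ∈ lst, (PySem.Dict.get? dic i).isSome) →
      hfB_filter dic h lst = some (filtPure dic h lst) := by
  intro lst
  induction lst with
  | nil => intro _; rfl
  | cons i rest ih =>
    intro hp
    obtain ⟨v, hv⟩ := Option.isSome_iff_exists.mp (hp i (by simp))
    simp only [hfB_filter, filtPure, hv]
    rw [ih (fun j hj => hp j (by simp [hj]))]
    simp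

theorem hfA_loop_eq (dic : PySem.Dict String Int) :
    ∀ (lst : List String) (res : List String) (high : Int),
      (∀ i ∈ lst, (PySem.Dict.get? dic i).isSome) →
      hfA_loop dic lst res high =
        some ((if hiPure dic lst high = high then res else []) ++
                filtPure dic (hiPure dic lst high) lst,
              hiPure dic lst high) := by
  intro lst
  induction lst with
  | nil => intro res high _; simp [hfA_loop, hiPure, filtPure]
  | cons i rest ih =>
    intro res high hp
    obtain ⟨v, hv⟩ := Option.isSome_iff_exists.mp (hp i (by simp))
    have hrest : ∀ j ∈ rest, (PySem.Dict.get? dic j).isSome :=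
      fun j hj => hp j (by simp [hj])
    simp only [hfA_loop, hiPure, filtPure, hv, Option.getD_some]
    by_cases hge : v ≥ high
    · rw [if_pos hge]
      by_cases heq : v = high
      · rw [if_pos heq]
        rw [ih (res ++ [i]) v hrest]
        subst heq
        have hle : v ≤ hiPure dic rest v := hiPure_ge dic rest v
        by_cases hfin : hiPure dic rest v = v
        · simp [hfin]
        · have hnv : ¬ v = hiPure dic rest v := fun h => hfin h.symm
          simp [hfin, hnv]
      · rw [if_neg heq]
        rw [ih [i] v hrest]
        have hvgt : high < v := lt_of_le_of_ne hge (Ne.symm heq)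
        have hle : v ≤ hiPure dic rest v := hiPure_ge dic rest v
        have h1 : hiPure dic rest (if v > high then v else high) = hiPure dic rest v := by
          rw [if_pos hvgt]
        rw [h1]
        have hne : ¬ hiPure dic rest v = high := by omega
        by_cases hfin : hiPure dic rest v = v
        · simp [hfin, heq]
        · have hnv : ¬ v = hiPure dic rest v := fun h => hfin h.symm
          simp [hfin, hne, hnv]
    · rw [if_neg hge]
      rw [ih res high hrest]
      have h1 : hiPure dic rest (if v > high then v else high) = hiPure dic rest high := by
        rw [if_neg (by omega)]
      rw [h1]
      have hle : high ≤ hiPure dic rest high := hiPure_ge dic rest high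
      have hnv : ¬ v = hiPure dic rest high := by omega
      simp [hnv]

-- ===== VERDICT (by name: the statement is the Claim_ definition above) =====
theorem highest_frequency_spec : Claim_equal_highest_frequency := by
  intro lst dic _ hpre
  unfold Spec_highest_frequency highest_frequency highest_frequency_alt
  have hpre' : ∀ i ∈ lst, (PySem.Dict.get? (PySem.Dict.ofList dic) i).isSome := hpre
  rw [hfA_loop_eq _ lst [] 0 hpre', hfB_high_eq _ lst 0 hpre']
  simp [hfB_filter_eq _ (hiPure (PySem.Dict.ofList dic) lst 0) lst hpre']
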